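-- pv_equiv track=rewrite | github.com/TDS-Study/algorithm_study | 202207_1week/HJK_여행경로_레벨3.py | dfs
-- ===== SOURCE A (Python) =====
-- def dfs(graph, start, visited, end_count):
--
--     # 더 갈곳이 없다
--     if start not in graph.keys() or len(graph[start]) == 0:
--         if len(visited) == end_count:
--             return visited
--         else:
--             return None
--
--     next_city = graph[start].pop(0)
--     visited.append(next_city)
--
--     return dfs(graph, next_city, visited, end_count)
-- ===== SOURCE B (Python) =====
-- def dfs(graph, start, visited, end_count):
--     while start in graph and graph[start]:
--         start = graph[start].pop(0)
--         visited.append(start)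
--     return visited if len(visited) == end_count else None
-- ===== Notes on version B (the rewrite author's own statement) =====
-- stated objective: idiomatic
-- what changed: The tail-recursive descent is rewritten as an iterative while loop that pops the head edge and appends it to visited, with the length == end_count check done once after the loop instead of at the recursion's base case.
import Mathlib
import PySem

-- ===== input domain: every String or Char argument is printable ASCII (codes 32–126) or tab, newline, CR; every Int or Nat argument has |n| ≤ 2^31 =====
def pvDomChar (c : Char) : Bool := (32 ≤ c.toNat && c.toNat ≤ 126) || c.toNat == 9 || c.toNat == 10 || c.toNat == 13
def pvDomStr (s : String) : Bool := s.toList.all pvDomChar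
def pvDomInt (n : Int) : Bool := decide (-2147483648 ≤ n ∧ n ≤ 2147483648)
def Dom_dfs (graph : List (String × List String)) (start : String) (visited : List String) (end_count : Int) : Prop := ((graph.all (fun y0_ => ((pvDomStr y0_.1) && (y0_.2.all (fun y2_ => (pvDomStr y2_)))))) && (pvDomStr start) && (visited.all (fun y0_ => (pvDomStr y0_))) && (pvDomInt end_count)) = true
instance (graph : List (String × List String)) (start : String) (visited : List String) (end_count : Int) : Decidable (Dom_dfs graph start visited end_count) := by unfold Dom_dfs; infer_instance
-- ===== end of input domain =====

-- B rewrites A's tail-recursive greedy descent as an iterative while loop (same pop/append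
-- mutations on graph and visited, which both versions perform in place; the equivalence proved
-- here is about the return value).


-- ===== PORT A =====
-- graph[start].pop(0): replace the first entry keyed `start` by its tail (exact for a Python
-- dict, whose keys are unique, so this first entry is the only one).
def popHead : List (String × List String) → String → List (String × List String)
  | [], _ => []
  | (k, v) :: rest, s => if k == s then (k, v.tail) :: rest else (k, v) :: popHead rest s

-- termination measure: total number of edges left in the graph
def edgeCount (graph : List (String × List String)) : Nat :=
  (graph.map (fun p => p.2.length)).sum

theorem edgeCount_popHead_lt (graph : List (String × List String)) (s : String)
    (x : String) (xs : List String)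
    (h : (PySem.Dict.mk graph).get? s = some (x :: xs)) :
    edgeCount (popHead graph s) < edgeCount graph := by
  induction graph with
  | nil => simp [PySem.Dict.get?] at h
  | cons p rest ih =>
    obtain ⟨k, v⟩ := p
    rw [PySem.Dict.get?_mk_cons] at h
    by_cases hk : k == s
    · simp only [hk, if_pos] at h
      injection h with h
      subst h
      simp [popHead, hk, edgeCount]
    · simp only [hk, if_neg, Bool.false_eq_true, not_false_iff] at h
      simp only [popHead, hk, Bool.false_eq_true, if_false]
      have := ih h
      simp only [edgeCount, List.map_cons, List.sum_cons] at *
      omega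

-- A: tail recursion; check len(visited) == end_count at the dead end, else pop the first
-- neighbour, append it to visited, and recurse.
def dfs (graph : List (String × List String)) (start : String) (visited : List String) (end_count : Int) : Option (List String) :=
  match h : (PySem.Dict.mk graph).get? start with
  | none => if (visited.length : Int) = end_count then some visited else none
  | some [] => if (visited.length : Int) = end_count then some visited else none
  | some (next :: _) =>
    dfs (popHead graph start) next (visited ++ [next]) end_count
termination_by edgeCount graph
decreasing_by exact edgeCount_popHead_lt graph start _ _ h

-- ===== PORT B =====
-- B's while loop: walk while the current node has an outgoing edge, extending visited.
def walk (graph : List (String × List String)) (start : String) (visited : List String) : List String :=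
  match h : (PySem.Dict.mk graph).get? start with
  | none => visited
  | some [] => visited
  | some (next :: _) => walk (popHead graph start) next (visited ++ [next])
termination_by edgeCount graph
decreasing_by exact edgeCount_popHead_lt graph start _ _ h

-- B: run the loop, then a single final check.
def dfs_alt (graph : List (String × List String)) (start : String) (visited : List String) (end_count : Int) : Option (List String) :=
  let v := walk graph start visited
  if (v.length : Int) = end_count then some v else none

-- ===== PRECONDITION & SPEC =====
def Spec_dfs (graph : List (String × List String)) (start : String) (visited : List String) (end_count : Int) (out : Option (List String)) : Prop := out = dfs_alt graph start visited end_count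
instance (graph : List (String × List String)) (start : String) (visited : List String) (end_count : Int) (out : Option (List String)) : Decidable (Spec_dfs graph start visited end_count out) := by unfold Spec_dfs; infer_instance

-- ===== CLAIM (what is proved, stated in full; the proofs are below) =====
def Claim_equal_dfs : Prop := ∀ (graph : List (String × List String)) (start : String) (visited : List String) (end_count : Int), Dom_dfs graph start visited end_count → Spec_dfs graph start visited end_count (dfs graph start visited end_count)

-- ===== LEMMAS AND PROOFS =====
theorem dfs_eq_alt (graph : List (String × List String)) (start : String) (visited : List String) (end_count : Int) :
    dfs graph start visited end_count = dfs_alt graph start visited end_count := by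
  fun_induction dfs graph start visited end_count
  all_goals simp only [dfs_alt]
  all_goals (conv_rhs => rw [walk])
  all_goals split <;> simp_all [dfs_alt]

-- ===== VERDICT (by name: the statement is the Claim_ definition above) =====
theorem dfs_spec : Claim_equal_dfs := by
  intro graph start visited end_count _
  exact dfs_eq_alt graph start visited end_count
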